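-- pv_equiv track=rewrite | github.com/nhajouji/supsingecs | supsingpythonNEWinprogress.py | chooseNonSquare
-- ===== SOURCE A (Python) =====
-- def chooseNonSquare(p):
--     # The suitable nonsquares are:
--     nonSquares = [-1,-2,-3,-7,-11,-19,-43,-67,-163]
--     # Now we go through the list until we find one which is not a square.
--     # -1 is not a square mod p iff p is 3 mod 4
--     if p % 4 == 3:
--         return -1
--     # Otherwise p is 1 mod 4, so -1 is a square. Furthermore, for any prime q,
--     # p is a square mod q iff q is a square mod p.
--     # Putting it all together, -q is a square mod p iff q is a square mod p
--     # iff p is a square mod q.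
--     # So, -3 is not a square mod p iff p is not a square mod 3 iff p is 2 mod 3:
--     elif p % 3 == 2:
--         return -3
--     # Similarly, -2 is not a square mod p iff 2 is not a square.
--     # 2 is a square mod p iff p is 1 or 7 mod 8, so 2 is a nonsquare iff
--     # p is +/- 3 mod 8.
--     # However, we know that p is NOT 3 mod 8, otherwise p would be 3 mod 4,
--     # which has already been checked for. Therefore, -2 is a nonsquare iff
--     # p % 8 = 5 (for primes at this stage in the algorithm).
--     elif p % 8 == 5:
--         return -2
--     # For the remaining possible values, there are multiple residue classes
--     # that can work. We check each of the remaining nonsquares in the list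
--     # until we find one that works.
--     for d in [-7,-11,-19,-43,-67,-163]:
--         q = -d
--         sqs = [a**2 % q for a in range(1,(q+1)//2)]
--         p0 = p % q
--         if p0 not in sqs:
--             return d
--     return "Couldn't find one - make sure p is an odd prime, and p < 15073 "
-- ===== SOURCE B (Python) =====
-- def chooseNonSquare(p):
--     # Table-driven: the three modular shortcuts become one scan of a
--     # (modulus, residue, d) table, and the remaining discriminants are
--     # selected with next()/filter over Euler's criterion instead of
--     # enumerating every square mod q.
--     guards = [(4, 3, -1), (3, 2, -3), (8, 5, -2)]
--     hit = next((d for (m, r, d) in guards if p % m == r), None)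
--     if hit is not None:
--         return hit
--     euler = lambda d: pow(p % -d, (-d - 1) // 2, -d) != 1
--     hit = next(filter(euler, [-7, -11, -19, -43, -67, -163]), None)
--     if hit is not None:
--         return hit
--     return "Couldn't find one - make sure p is an odd prime, and p < 15073 "
-- ===== Notes on version B (the rewrite author's own statement) =====
-- stated objective: idiomatic
-- what changed: The if/elif guard chain becomes one next() scan over a (modulus,residue,d) table, and the inner 'build all squares mod q and membership-test' pass is replaced by a next()/filter with Euler's criterion pow(p%q,(q-1)//2,q) != 1.
import Mathlib
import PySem

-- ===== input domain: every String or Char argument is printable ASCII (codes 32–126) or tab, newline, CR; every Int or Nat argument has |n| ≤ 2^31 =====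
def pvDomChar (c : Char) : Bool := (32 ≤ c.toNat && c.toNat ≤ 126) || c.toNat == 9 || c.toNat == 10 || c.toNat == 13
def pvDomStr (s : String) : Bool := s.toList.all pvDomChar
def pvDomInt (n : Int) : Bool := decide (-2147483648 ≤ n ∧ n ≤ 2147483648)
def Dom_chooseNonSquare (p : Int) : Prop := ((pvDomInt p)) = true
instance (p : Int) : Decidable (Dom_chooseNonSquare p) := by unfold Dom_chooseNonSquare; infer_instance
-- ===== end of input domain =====

set_option maxRecDepth 4000


-- B is table-driven: one find? over (modulus,residue,d) guards, then find? with
-- Euler's criterion instead of enumerating all squares mod q (idiomatic; same values).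

-- ===== PORT A =====
-- The `for d in [...]` loop is structural recursion over the literal list; where the
-- Python falls through and returns a STRING (excluded by Pre_), the port returns 0.
def chooseLoopA (p : Int) : List Int → Int
  | [] => 0
  | d :: ds =>
    let q := -d
    let sqs := (PySem.List.pyRange 1 (PySem.Int.floordiv (q+1) 2) 1).map
                 (fun a => PySem.Int.mod (a^2) q)
    let p0 := PySem.Int.mod p q
    if ¬ (p0 ∈ sqs) then d else chooseLoopA p ds

def chooseNonSquare (p : Int) : Int :=
  if PySem.Int.mod p 4 = 3 then -1
  else if PySem.Int.mod p 3 = 2 then -3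
  else if PySem.Int.mod p 8 = 5 then -2
  else chooseLoopA p [-7, -11, -19, -43, -67, -163]

-- ===== PORT B =====
-- next((… for … if …), None) / next(filter(…), None) are List.find? (first match or
-- none); pow(b, e, m) is PySem.Int.powMod ((-d-1)//2 ≥ 0 here, so .toNat is exact).
def chooseNonSquare_alt (p : Int) : Int :=
  match ([(4,3,-1), (3,2,-3), (8,5,-2)] : List (Int × Int × Int)).find?
      (fun t => PySem.Int.mod p t.1 == t.2.1) with
  | some t => t.2.2
  | none =>
    match ([-7, -11, -19, -43, -67, -163] : List Int).find?
        (fun d => PySem.Int.powMod (PySem.Int.mod p (-d))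
                    (PySem.Int.floordiv (-d - 1) 2).toNat (-d) != 1) with
    | some d => d
    | none => 0

-- ===== PRECONDITION & SPEC =====
-- Pre_ excludes exactly the inputs on which the Python A falls through its loop and
-- returns a STRING instead of an int (p a square modulo every modulus it checks).
def Pre_chooseNonSquare (p : Int) : Prop :=
  PySem.Int.mod p 4 = 3 ∨ PySem.Int.mod p 3 = 2 ∨ PySem.Int.mod p 8 = 5 ∨
    ([(7:Int), 11, 19, 43, 67, 163].any (fun q =>
      (List.range q.toNat).all (fun a =>
        a == 0 || PySem.Int.mod ((a:Int)*(a:Int)) q != PySem.Int.mod p q))) = true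
instance (p : Int) : Decidable (Pre_chooseNonSquare p) := by unfold Pre_chooseNonSquare; infer_instance
def pvWitness_chooseNonSquare : Int := 13

def Spec_chooseNonSquare (p : Int) (out : Int) : Prop := out = chooseNonSquare_alt p
instance (p : Int) (out : Int) : Decidable (Spec_chooseNonSquare p out) := by unfold Spec_chooseNonSquare; infer_instance

-- ===== CLAIM (what is proved, stated in full; the proofs are below) =====
def Claim_equal_chooseNonSquare : Prop := ∀ (p : Int), Dom_chooseNonSquare p → Pre_chooseNonSquare p → Spec_chooseNonSquare p (chooseNonSquare p)

-- ===== LEMMAS AND PROOFS =====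

-- For a fixed odd prime q of the list, A's membership test and B's Euler test agree
-- on every residue.
theorem test_eq (q : Int) (hq : q = 7 ∨ q = 11 ∨ q = 19 ∨ q = 43 ∨ q = 67 ∨ q = 163)
    (p : Int) :
    ((PySem.Int.mod p q ∈ (PySem.List.pyRange 1 (PySem.Int.floordiv (q+1) 2) 1).map
        (fun a => PySem.Int.mod (a^2) q)) ↔
      PySem.Int.powMod (PySem.Int.mod p q) (PySem.Int.floordiv (q-1) 2).toNat q = 1) := by
  have hqpos : (0:Int) < q := by rcases hq with h|h|h|h|h|h <;> simp [h]
  have h0 : 0 ≤ PySem.Int.mod p q := PySem.Int.mod_nonneg p hqpos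
  have h1 : PySem.Int.mod p q < q := PySem.Int.mod_lt p hqpos
  have hr : PySem.Int.mod p q = ((PySem.Int.mod p q).toNat : Int) :=
    (Int.toNat_of_nonneg h0).symm
  rw [hr]
  have hb : (PySem.Int.mod p q).toNat < q.toNat := by omega
  revert hb
  generalize (PySem.Int.mod p q).toNat = n
  rcases hq with h|h|h|h|h|h <;> subst h <;> revert n <;> decide

-- A's explicit recursion equals the find?-based loop of B, whenever the two per-d
-- tests agree on every element of the list.
theorem loopA_find (p : Int) (ds : List Int)
    (h : ∀ d ∈ ds,
      ((PySem.Int.mod p (-d) ∈ (PySem.List.pyRange 1 (PySem.Int.floordiv (-d+1) 2) 1).map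
          (fun a => PySem.Int.mod (a^2) (-d))) ↔
        PySem.Int.powMod (PySem.Int.mod p (-d)) (PySem.Int.floordiv (-d - 1) 2).toNat (-d) = 1)) :
    chooseLoopA p ds =
      (match ds.find?
          (fun d => PySem.Int.powMod (PySem.Int.mod p (-d))
                      (PySem.Int.floordiv (-d - 1) 2).toNat (-d) != 1) with
        | some d => d
        | none => 0) := by
  induction ds with
  | nil => rfl
  | cons d ds ih =>
    have hd := h d (List.mem_cons_self ..)
    have hrest := ih (fun x hx => h x (List.mem_cons_of_mem _ hx))
    simp only [chooseLoopA, List.find?]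
    by_cases m : PySem.Int.mod p (-d) ∈ (PySem.List.pyRange 1 (PySem.Int.floordiv (-d+1) 2) 1).map
        (fun a => PySem.Int.mod (a^2) (-d))
    · have hb : (PySem.Int.powMod (PySem.Int.mod p (-d)) (PySem.Int.floordiv (-d - 1) 2).toNat (-d) != 1) = false := by
        rw [bne_eq_false_iff_eq]; exact hd.mp m
      rw [if_neg (not_not_intro m), hb]
      exact hrest
    · have hb : (PySem.Int.powMod (PySem.Int.mod p (-d)) (PySem.Int.floordiv (-d - 1) 2).toNat (-d) != 1) = true := by
        rw [bne_iff_ne]; exact fun hq => m (hd.mpr hq)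
      rw [if_pos m, hb]

theorem loop_eq (p : Int) :
    chooseLoopA p [-7, -11, -19, -43, -67, -163] =
      (match ([-7, -11, -19, -43, -67, -163] : List Int).find?
          (fun d => PySem.Int.powMod (PySem.Int.mod p (-d))
                      (PySem.Int.floordiv (-d - 1) 2).toNat (-d) != 1) with
        | some d => d
        | none => 0) := by
  refine loopA_find p _ ?_
  intro d hd
  have key : ∀ q : Int, q = 7 ∨ q = 11 ∨ q = 19 ∨ q = 43 ∨ q = 67 ∨ q = 163 →
      ((PySem.Int.mod p q ∈ (PySem.List.pyRange 1 (PySem.Int.floordiv (q+1) 2) 1).map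
          (fun a => PySem.Int.mod (a^2) q)) ↔
        PySem.Int.powMod (PySem.Int.mod p q) (PySem.Int.floordiv (q-1) 2).toNat q = 1) :=
    fun q hq => test_eq q hq p
  have hneg : -d = 7 ∨ -d = 11 ∨ -d = 19 ∨ -d = 43 ∨ -d = 67 ∨ -d = 163 := by
    simp only [List.mem_cons, List.not_mem_nil, or_false] at hd
    rcases hd with h|h|h|h|h|h <;> subst h <;> norm_num
  exact key (-d) hneg

-- ===== VERDICT (by name: the statement is the Claim_ definition above) =====
theorem chooseNonSquare_spec : Claim_equal_chooseNonSquare := by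
  intro p _ _
  unfold Spec_chooseNonSquare chooseNonSquare chooseNonSquare_alt
  rw [loop_eq p]
  simp only [List.find?]
  by_cases h4 : PySem.Int.mod p 4 = 3
  · have b4 : (PySem.Int.mod p 4 == 3) = true := beq_iff_eq.mpr h4
    rw [if_pos h4, b4]
  · have b4 : (PySem.Int.mod p 4 == 3) = false := beq_eq_false_iff_ne.mpr h4
    by_cases h3 : PySem.Int.mod p 3 = 2
    · have b3 : (PySem.Int.mod p 3 == 2) = true := beq_iff_eq.mpr h3
      rw [if_neg h4, if_pos h3, b4, b3]
    · have b3 : (PySem.Int.mod p 3 == 2) = false := beq_eq_false_iff_ne.mpr h3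
      by_cases h8 : PySem.Int.mod p 8 = 5
      · have b8 : (PySem.Int.mod p 8 == 5) = true := beq_iff_eq.mpr h8
        rw [if_neg h4, if_neg h3, if_pos h8, b4, b3, b8]
      · have b8 : (PySem.Int.mod p 8 == 5) = false := beq_eq_false_iff_ne.mpr h8
        rw [if_neg h4, if_neg h3, if_neg h8, b4, b3, b8]
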